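-- pv_equiv track=rewrite | github.com/AprajitaChhawi/365DaysOfCode.JULY | Day 26 repeating character first appearence.py | repeatingCharacter
-- ===== SOURCE A (Python) =====
-- def repeatingCharacter(s):
--     n=len(s)
--     m={}
--     for i in s:
--         if i in m:
--             m[i]=m[i]+1
--         else:
--             m[i]=1
--     for i in range(n):
--         if m[s[i]]>1:
--             return i
--     return -1
-- ===== SOURCE B (Python) =====
-- def repeatingCharacter(s):
--     # one pass: char -> (first index seen, count); answer = min first index among repeated chars
--     info = {}
--     for i, c in enumerate(s):
--         fk = info.get(c)
--         if fk is None: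
--             info[c] = (i, 1)
--         else:
--             info[c] = (fk[0], fk[1] + 1)
--     return min((f for (f, k) in info.values() if k > 1), default=-1)
-- ===== Notes on version B (the rewrite author's own statement) =====
-- stated objective: alternative
-- what changed: B makes a single pass recording each character's first index and count in one dict, then takes the minimum stored first-index among characters with count > 1 (default -1), instead of A's count map followed by a second ordered rescan of the string.
import Mathlib
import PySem

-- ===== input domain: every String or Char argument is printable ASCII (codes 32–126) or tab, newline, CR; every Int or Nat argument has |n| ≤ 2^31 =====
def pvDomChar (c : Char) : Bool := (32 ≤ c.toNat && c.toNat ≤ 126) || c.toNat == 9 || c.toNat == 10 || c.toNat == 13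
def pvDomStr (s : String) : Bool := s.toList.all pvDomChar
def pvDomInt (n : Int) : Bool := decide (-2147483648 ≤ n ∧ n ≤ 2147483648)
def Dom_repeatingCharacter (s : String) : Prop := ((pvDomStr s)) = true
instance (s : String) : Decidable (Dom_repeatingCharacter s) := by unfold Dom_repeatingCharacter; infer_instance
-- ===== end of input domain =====

-- B builds, in one pass, a dict char -> (first index, count) and returns the minimum stored
-- first-index among characters with count > 1 (default -1), instead of A's count map followed
-- by a second ordered rescan of the string; same O(n) cost, different decomposition.

-- ===== PORT A =====
-- first loop of A: m[i] = m[i]+1 if i in m else 1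
def pvCountsA (l : List Char) : PySem.Dict Char Int :=
  l.foldl (fun m i => if m.contains i then m.insert i (m.getD i 0 + 1) else m.insert i 1)
    PySem.Dict.empty

-- second loop of A with early return: for i in range(n): if m[s[i]] > 1: return i
-- (m[s[i]] is ported as getD: the key s[i] is always present after the first loop)
def pvScanA (l : List Char) (m : PySem.Dict Char Int) : List Int → Int
  | [] => -1
  | i :: rest => if 1 < m.getD (PySem.List.pyGetD l i ' ') 0 then i else pvScanA l m rest

def repeatingCharacter (s : String) : Int :=
  let n : Int := PySem.Str.len s
  let m := pvCountsA s.toList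
  pvScanA s.toList m (PySem.List.pyRange 0 n 1)

-- ===== PORT B =====
-- one pass over enumerate(s): info[c] = (first index, count)
def pvInfoB (l : List Char) : PySem.Dict Char (Int × Int) :=
  (PySem.List.enumerate l 0).foldl
    (fun d p =>
      match d.get? p.2 with
      | none => d.insert p.2 (p.1, 1)
      | some fk => d.insert p.2 (fk.1, fk.2 + 1))
    PySem.Dict.empty

-- min((f for (f, k) in info.values() if k > 1), default=-1)
def repeatingCharacter_alt (s : String) : Int :=
  let info := pvInfoB s.toList
  match PySem.List.min? (((info.values).filter (fun fk => 1 < fk.2)).map (fun fk => fk.1))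
      (fun x => x) with
  | some v => v
  | none => -1

-- ===== PRECONDITION & SPEC =====
def Spec_repeatingCharacter (s : String) (out : Int) : Prop := out = repeatingCharacter_alt s
instance (s : String) (out : Int) : Decidable (Spec_repeatingCharacter s out) := by unfold Spec_repeatingCharacter; infer_instance

-- ===== CLAIM (what is proved, stated in full; the proofs are below) =====
def Claim_equal_repeatingCharacter : Prop := ∀ (s : String), Dom_repeatingCharacter s → Spec_repeatingCharacter s (repeatingCharacter s)

-- ===== LEMMAS AND PROOFS =====

-- A's count dict is the counter of l
theorem pvCountsA_getD (l : List Char) (c : Char) :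
    (pvCountsA l).getD c 0 = (l.count c : Int) := by
  have hf : (fun (m : PySem.Dict Char Int) i =>
        if m.contains i then m.insert i (m.getD i 0 + 1) else m.insert i 1)
      = (fun (m : PySem.Dict Char Int) i => m.insert i (m.getD i 0 + 1)) := by
    funext m i
    by_cases h : m.contains i = true
    · simp [h]
    · simp only [Bool.not_eq_true] at h
      have h0 : m.getD i 0 = 0 := PySem.Dict.getD_of_not_contains m 0 h
      simp [h, h0]
  rw [pvCountsA, hf, PySem.Dict.foldl_insert_getD_add_one_eq_counter, PySem.Dict.getD_counter]

-- B's dict, characterized: first-occurrence keys in order, each with (first index, count)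
theorem pvInfoB_keys (l : List Char)
    (h : (pvInfoB l).items
      = (PySem.Set.ofList l).map (fun c => (c, ((l.idxOf c : Int), (l.count c : Int))))) :
    (pvInfoB l).keys = PySem.Set.ofList l := by
  show (pvInfoB l).items.map (·.1) = _
  rw [h, List.map_map]
  simp [Function.comp_def]

theorem pvInfoB_items (l : List Char) :
    (pvInfoB l).items
      = (PySem.Set.ofList l).map (fun c => (c, ((l.idxOf c : Int), (l.count c : Int)))) := by
  induction l using List.reverseRecOn with
  | nil => rfl
  | append_singleton l c ih =>
    have hkeys : (pvInfoB l).keys = PySem.Set.ofList l := pvInfoB_keys l ih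
    have hnodup : (pvInfoB l).keys.Nodup := by rw [hkeys]; exact PySem.Set.nodup_ofList l
    have hstep : pvInfoB (l ++ [c])
        = (match (pvInfoB l).get? c with
           | none => (pvInfoB l).insert c ((0 + (l.length : Int)), 1)
           | some fk => (pvInfoB l).insert c (fk.1, fk.2 + 1)) := by
      rw [pvInfoB, pvInfoB, PySem.List.enumerate_append, List.foldl_append]
      simp [PySem.List.enumerate_cons, PySem.List.enumerate_nil]
    by_cases hc : c ∈ l
    · have hmemS : c ∈ PySem.Set.ofList l := (PySem.Set.mem_ofList l c).mpr hc
      have hpair : (c, ((l.idxOf c : Int), (l.count c : Int))) ∈ (pvInfoB l).items := by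
        rw [ih]; exact List.mem_map_of_mem hmemS
      have hget : (pvInfoB l).get? c = some ((l.idxOf c : Int), (l.count c : Int)) :=
        PySem.Dict.get?_of_mem_items _ hpair hnodup
      have hcont : (pvInfoB l).contains c = true := by
        rw [PySem.Dict.contains_iff_mem_keys, hkeys]; exact hmemS
      rw [hstep, hget]
      rw [PySem.Dict.items_insert_of_contains _ _ hcont, ih, List.map_map]
      have hof : PySem.Set.ofList (l ++ [c]) = PySem.Set.ofList l := by
        rw [PySem.Set.ofList_append_singleton, PySem.Set.add_of_mem hmemS]
      rw [hof]
      apply List.map_congr_left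
      intro x hx
      have hxl : x ∈ l := (PySem.Set.mem_ofList l x).mp hx
      by_cases hxc : x = c
      · subst hxc
        simp only [Function.comp, beq_self_eq_true, if_pos]
        have hcnt : (l ++ [x]).count x = l.count x + 1 := by
          rw [List.count_append]; simp
        have hidx : (l ++ [x]).idxOf x = l.idxOf x := List.idxOf_append_of_mem hxl
        rw [hcnt, hidx]
        push_cast
        rfl
      · have hb : (x == c) = false := beq_eq_false_iff_ne.mpr hxc
        simp only [Function.comp, hb, if_neg, Bool.false_eq_true, not_false_iff]
        have hcnt : (l ++ [c]).count x = l.count x := by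
          rw [List.count_append]
          simp [Ne.symm hxc]
        have hidx : (l ++ [c]).idxOf x = l.idxOf x := List.idxOf_append_of_mem hxl
        rw [hcnt, hidx]
    · have hnotS : c ∉ PySem.Set.ofList l := fun h => hc ((PySem.Set.mem_ofList l c).mp h)
      have hget : (pvInfoB l).get? c = none := by
        rw [PySem.Dict.get?_eq_none_iff_not_mem_keys, hkeys]; exact hnotS
      have hcont : (pvInfoB l).contains c = false := by
        rw [← PySem.Dict.get?_eq_none_iff_contains]; exact hget
      rw [hstep, hget]
      rw [PySem.Dict.items_insert_of_not_contains _ _ hcont, ih]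
      have hof : PySem.Set.ofList (l ++ [c]) = PySem.Set.ofList l ++ [c] := by
        rw [PySem.Set.ofList_append_singleton, PySem.Set.add_of_not_mem hnotS]
      rw [hof, List.map_append]
      congr 1
      · apply List.map_congr_left
        intro x hx
        have hxl : x ∈ l := (PySem.Set.mem_ofList l x).mp hx
        have hxc : x ≠ c := fun h => hc (h ▸ hxl)
        have hcnt : (l ++ [c]).count x = l.count x := by
          rw [List.count_append]; simp [Ne.symm hxc]
        have hidx : (l ++ [c]).idxOf x = l.idxOf x := List.idxOf_append_of_mem hxl
        rw [hcnt, hidx]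
      · have hidx : (l ++ [c]).idxOf c = l.length := by
          rw [List.idxOf_append_of_notMem hc]; simp
        have hcnt : (l ++ [c]).count c = 1 := by
          rw [List.count_append, List.count_eq_zero_of_not_mem hc]; simp
        simp [hidx, List.count_eq_zero_of_not_mem hc]

-- the answer both programs compute, as a findIdx?
theorem scanA_spec (l : List Char) (m : PySem.Dict Char Int)
    (hm : ∀ c, m.getD c 0 = (l.count c : Int)) :
    ∀ (k a : Nat), a + k = l.length →
      pvScanA l m (PySem.List.pyRange a l.length 1)
        = match (l.drop a).findIdx? (fun c => decide (1 < l.count c)) with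
          | some j => ((a + j : Nat) : Int)
          | none => -1 := by
  intro k
  induction k with
  | zero =>
    intro a ha
    have h1 : PySem.List.pyRange (a : Int) (l.length : Int) 1 = [] :=
      PySem.List.pyRange_one_eq_nil (by omega)
    have h2 : l.drop a = [] := List.drop_of_length_le (by omega)
    rw [h1, h2]
    simp [pvScanA]
  | succ k ihk =>
    intro a ha
    have hlt : a < l.length := by omega
    have h1 : PySem.List.pyRange (a : Int) (l.length : Int) 1
        = (a : Int) :: PySem.List.pyRange ((a : Int) + 1) (l.length : Int) 1 :=
      PySem.List.pyRange_one_cons (by exact_mod_cast hlt)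
    have hget : PySem.List.pyGetD l ((a : Nat) : Int) ' ' = l[a] := by
      rw [PySem.List.pyGetD_natCast]
      exact List.getD_eq_getElem l ' ' hlt
    have hdrop : l.drop a = l[a] :: l.drop (a + 1) := List.drop_eq_getElem_cons hlt
    have hrec := ihk (a + 1) (by omega)
    rw [h1]
    show (if 1 < m.getD (PySem.List.pyGetD l (a : Int) ' ') 0 then (a : Int)
          else pvScanA l m (PySem.List.pyRange ((a : Int) + 1) (l.length : Int) 1)) = _
    rw [hget, hm, hdrop, List.findIdx?_cons]
    by_cases hp : 1 < l.count l[a]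
    · rw [if_pos (by exact_mod_cast hp)]
      simp [hp]
    · rw [if_neg (by exact_mod_cast hp)]
      have hcast : ((a : Nat) : Int) + 1 = (((a + 1 : Nat)) : Int) := by push_cast; ring
      rw [hcast, hrec]
      simp only [hp, decide_false]
      cases hfi : (l.drop (a + 1)).findIdx? (fun c => decide (1 < l.count c)) with
      | none => simp
      | some j =>
        simp only [Option.map_some]
        push_cast
        ring_nf

-- the least index whose character repeats, as B's min over first-occurrence indices
theorem min_cand_spec (l : List Char) (i : Nat)
    (hfind : l.findIdx? (fun c => decide (1 < l.count c)) = some i) :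
    PySem.List.min?
      (((PySem.Set.ofList l).filter (fun c => decide (1 < l.count c))).map
        (fun c => (l.idxOf c : Int))) (fun x => x) = some (i : Int) := by
  obtain ⟨hi, hpi, hmin⟩ := List.findIdx?_eq_some_iff_getElem.mp hfind
  simp only [decide_eq_true_eq] at hpi
  have hc0mem : l[i] ∈ l := l.getElem_mem hi
  have hidx : l.idxOf l[i] = i := by
    apply le_antisymm
    · have htake : l[i] ∈ l.take (i + 1) := by
        have hlen : i < (l.take (i + 1)).length := by
          simp [List.length_take]; omega
        have : (l.take (i + 1))[i] = l[i] := List.getElem_take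
        exact this ▸ (l.take (i + 1)).getElem_mem hlen
      have := (List.mem_take_iff_idxOf_lt hc0mem).mp htake
      omega
    · by_contra hlt
      push Not at hlt
      have hl2 : l.idxOf l[i] < l.length := List.idxOf_lt_length_of_mem hc0mem
      have heq : l[l.idxOf l[i]] = l[i] := List.getElem_idxOf hl2
      have := hmin (l.idxOf l[i]) hlt
      rw [heq] at this
      simp [hpi] at this
  have hicand : (i : Int) ∈
      ((PySem.Set.ofList l).filter (fun c => decide (1 < l.count c))).map
        (fun c => (l.idxOf c : Int)) := by
    rw [← hidx]
    apply List.mem_map_of_mem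
    rw [List.mem_filter]
    exact ⟨(PySem.Set.mem_ofList l _).mpr hc0mem, by simp [hpi]⟩
  have hlb : ∀ x ∈ ((PySem.Set.ofList l).filter (fun c => decide (1 < l.count c))).map
      (fun c => (l.idxOf c : Int)), (i : Int) ≤ x := by
    intro x hx
    rw [List.mem_map] at hx
    obtain ⟨c, hcf, rfl⟩ := hx
    rw [List.mem_filter] at hcf
    obtain ⟨hcS, hcp⟩ := hcf
    have hcl : c ∈ l := (PySem.Set.mem_ofList l c).mp hcS
    simp only [decide_eq_true_eq] at hcp
    have ht : l.idxOf c < l.length := List.idxOf_lt_length_of_mem hcl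
    have heq : l[l.idxOf c] = c := List.getElem_idxOf ht
    by_contra hxi
    push Not at hxi
    have hlt : l.idxOf c < i := by exact_mod_cast hxi
    have := hmin (l.idxOf c) hlt
    rw [heq] at this
    simp [hcp] at this
  cases hm? : PySem.List.min?
      (((PySem.Set.ofList l).filter (fun c => decide (1 < l.count c))).map
        (fun c => (l.idxOf c : Int))) (fun x => x) with
  | none =>
    have := (PySem.List.min?_eq_none_iff _ _).mp hm?
    rw [this] at hicand
    simp at hicand
  | some v =>
    have hv := PySem.List.min?_mem hm?
    have h1 : v ≤ (i : Int) := PySem.List.min?_isMin hm? _ hicand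
    have h2 : (i : Int) ≤ v := hlb v hv
    rw [le_antisymm h1 h2]

theorem repeatingCharacter_spec : Claim_equal_repeatingCharacter := by
  intro s _
  unfold Spec_repeatingCharacter repeatingCharacter repeatingCharacter_alt
  have hlen : PySem.Str.len s = (s.toList.length : Int) := PySem.Str.len_eq s
  have hA := scanA_spec s.toList (pvCountsA s.toList) (pvCountsA_getD s.toList)
    s.toList.length 0 (by omega)
  simp only [List.drop_zero, Nat.cast_zero] at hA
  have hvals : (pvInfoB s.toList).values
      = (PySem.Set.ofList s.toList).map
          (fun c => ((s.toList.idxOf c : Int), (s.toList.count c : Int))) := by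
    show (pvInfoB s.toList).items.map (·.2) = _
    rw [pvInfoB_items, List.map_map]
    rfl
  have hcand : (((pvInfoB s.toList).values.filter (fun fk => 1 < fk.2)).map (fun fk => fk.1))
      = ((PySem.Set.ofList s.toList).filter (fun c => decide (1 < s.toList.count c))).map
          (fun c => (s.toList.idxOf c : Int)) := by
    rw [hvals, List.filter_map, List.map_map]
    congr 1
    apply List.filter_congr
    intro x _
    simp [Function.comp]
  simp only [hlen, hcand]
  rw [hA]
  cases hfind : s.toList.findIdx? (fun c => decide (1 < s.toList.count c)) with
  | none =>
    have hall := List.findIdx?_eq_none_iff.mp hfind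
    have hnil : ((PySem.Set.ofList s.toList).filter
        (fun c => decide (1 < s.toList.count c))).map (fun c => (s.toList.idxOf c : Int)) = [] := by
      rw [List.map_eq_nil_iff, List.filter_eq_nil_iff]
      intro c hc
      simp [hall c ((PySem.Set.mem_ofList _ c).mp hc)]
    rw [hnil]
    rfl
  | some i =>
    rw [min_cand_spec s.toList i hfind]
    simp
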